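-- pv_equiv track=rewrite | github.com/salvarezt/crypto_monkas_backend | crypto_monkas_backend/resources/shift.py | shift_key
-- ===== SOURCE A (Python) =====
-- def shift_key(value: str) -> int:
--     value = "".join([c if (c.isdecimal() or c.isspace()) else "" for c in value])
--     value = value.split()
--     try:
--         value = int(value[0]) % 26
--     except IndexError:
--         raise ValueError("No argument was provided")
--     except ValueError:
--         raise ValueError("Argument can't be parse as integer")
--
--     return value
-- ===== SOURCE B (Python) =====
-- def shift_key(value: str) -> int:
--     started = False
--     buf = []
--     for c in value:
--         if c.isdecimal():
--             started = True
--             buf.append(c)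
--         elif c.isspace():
--             if started:
--                 break
--         # any other character is skipped transparently
--     if not buf:
--         raise ValueError("No argument was provided")
--     return int("".join(buf)) % 26
-- ===== Notes on version B (the rewrite author's own statement) =====
-- stated objective: alternative
-- what changed: B replaces A's build-filtered-string-then-split pipeline by a single early-stopping pass with a started flag that collects the first run of digit characters (merged across non-space junk) directly.
-- outside the precondition, e.g. on shift_key('abc'): A raises ValueError, B raises ValueError
import Mathlib
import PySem

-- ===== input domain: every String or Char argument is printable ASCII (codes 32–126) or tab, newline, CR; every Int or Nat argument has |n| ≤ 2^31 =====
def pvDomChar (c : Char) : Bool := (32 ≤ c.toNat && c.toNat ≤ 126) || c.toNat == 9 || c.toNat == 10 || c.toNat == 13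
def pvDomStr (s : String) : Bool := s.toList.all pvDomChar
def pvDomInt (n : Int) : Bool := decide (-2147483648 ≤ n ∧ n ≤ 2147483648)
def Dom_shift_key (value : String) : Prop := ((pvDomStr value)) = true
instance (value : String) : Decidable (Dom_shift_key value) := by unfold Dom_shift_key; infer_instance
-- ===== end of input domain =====

-- B replaces A's filter-join-then-split pipeline by one early-stopping pass with a
-- started flag collecting the first digit run directly; same values on Pre_ (alternative, not claimed faster).


-- ===== PORT A =====
-- isdecimal = isdigit on the ASCII domain; the comprehension + "".join is the flatMap below.
def shift_key (value : String) : Int :=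
  match PySem.Chars.split₀ (value.toList.flatMap
      (fun c => if PySem.Chars.isdigit c || PySem.Chars.isspace c then [c] else [])) with
  | [] => 0          -- IndexError → ValueError("No argument was provided"); excluded by Pre_
  | t :: _ =>
    match PySem.Int.ofChars? t with
    | some n => PySem.Int.mod n 26
    | none => 0      -- int() ValueError branch (unreachable: t is a nonempty digit run)

-- ===== PORT B =====
-- one pass: started flag + digit buffer, breaks at the first whitespace after the token started
def shiftKeyLoopB : List Char → Bool → List Char → List Char
  | [], _, buf => buf
  | c :: rest, started, buf =>
    if PySem.Chars.isdigit c then shiftKeyLoopB rest true (buf ++ [c])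
    else if PySem.Chars.isspace c then
      (if started then buf else shiftKeyLoopB rest started buf)
    else shiftKeyLoopB rest started buf

-- int("".join(buf)) % 26 after the loop, guarding the empty buffer (where B raises)
def shiftKeyFinishB (buf : List Char) : Int :=
  if buf.isEmpty then 0    -- B raises ValueError("No argument was provided"); excluded by Pre_
  else
    match PySem.Int.ofChars? buf with
    | some n => PySem.Int.mod n 26
    | none => 0            -- unreachable: buf is a nonempty digit run

def shift_key_alt (value : String) : Int :=
  shiftKeyFinishB (shiftKeyLoopB value.toList false [])

-- ===== PRECONDITION & SPEC =====
-- Pre_ excludes exactly the inputs with no decimal digit, where A (and B) raise ValueError.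
def Pre_shift_key (value : String) : Prop :=
  value.toList.any PySem.Chars.isdigit = true
instance (value : String) : Decidable (Pre_shift_key value) := by
  unfold Pre_shift_key; infer_instance

def pvWitness_shift_key : String := " 4 2x "

def Spec_shift_key (value : String) (out : Int) : Prop := out = shift_key_alt value
instance (value : String) (out : Int) : Decidable (Spec_shift_key value out) := by
  unfold Spec_shift_key; infer_instance

-- ===== CLAIM (what is proved, stated in full; the proofs are below) =====
def Claim_equal_shift_key : Prop :=
  ∀ (value : String), Dom_shift_key value → Pre_shift_key value →
    Spec_shift_key value (shift_key value)

-- ===== LEMMAS AND PROOFS =====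

theorem sk_digit_not_space (c : Char) (h : PySem.Chars.isdigit c = true) :
    PySem.Chars.isspace c = false := by
  have h1 : '0' ≤ c ∧ c ≤ '9' := by simpa [PySem.Chars.isdigit] using h
  have h0 : 48 ≤ c.toNat ∧ c.toNat ≤ 57 := by
    obtain ⟨a, b⟩ := h1
    rw [Char.le_def] at a b
    exact ⟨a, b⟩
  simp only [PySem.Chars.isspace]
  simp only [Bool.or_eq_false_iff, Bool.and_eq_false_iff, decide_eq_false_iff_not]
  omega

-- an accumulated token list only prefixes the result (reversed)
theorem sk_go_acc (s : List Char) : ∀ cur acc,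
    PySem.Chars.split₀.go s cur acc = acc.reverse ++ PySem.Chars.split₀.go s cur [] := by
  induction s with
  | nil =>
    intro cur acc
    simp only [PySem.Chars.split₀.go]
    split <;> simp
  | cons c rest ih =>
    intro cur acc
    simp only [PySem.Chars.split₀.go]
    by_cases hs : PySem.Chars.isspace c = true
    · rw [if_pos hs, if_pos hs]
      by_cases hc : cur.isEmpty = true
      · rw [if_pos hc, if_pos hc]; exact ih [] acc
      · rw [if_neg hc, if_neg hc, ih [] (cur.reverse :: acc), ih [] [cur.reverse]]
        simp
    · rw [if_neg hs, if_neg hs]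
      exact ih _ _

-- once inside a token, the first word is cur.reverse ++ the run up to the next space
theorem sk_first_tok (s : List Char) : ∀ cur, cur ≠ [] →
    (PySem.Chars.split₀.go s cur []).head? =
      some (cur.reverse ++ s.takeWhile (fun c => !PySem.Chars.isspace c)) := by
  induction s with
  | nil =>
    intro cur hcur
    simp [PySem.Chars.split₀.go, List.isEmpty_iff, hcur]
  | cons c rest ih =>
    intro cur hcur
    simp only [PySem.Chars.split₀.go]
    by_cases hs : PySem.Chars.isspace c = true
    · rw [if_pos hs, if_neg (by simp [List.isEmpty_iff, hcur]), sk_go_acc]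
      simp [hs]
    · rw [if_neg hs, ih (c :: cur) (by simp)]
      simp [hs]

theorem sk_loop_true (cs : List Char) : ∀ buf,
    shiftKeyLoopB cs true buf =
      buf ++ ((cs.filter (fun c => PySem.Chars.isdigit c || PySem.Chars.isspace c)).takeWhile
        (fun c => !PySem.Chars.isspace c)) := by
  induction cs with
  | nil => intro buf; simp [shiftKeyLoopB]
  | cons c rest ih =>
    intro buf
    simp only [shiftKeyLoopB]
    by_cases hd : PySem.Chars.isdigit c = true
    · simp [hd, sk_digit_not_space c hd, ih]
    · by_cases hs : PySem.Chars.isspace c = true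
      · simp [hd, hs]
      · simp [hd, hs, ih]

-- the first word of A's filtered-and-split string is exactly B's buffer
theorem sk_main (cs : List Char) (h : cs.any PySem.Chars.isdigit = true) :
    (PySem.Chars.split₀.go
        (cs.filter (fun c => PySem.Chars.isdigit c || PySem.Chars.isspace c)) [] []).head? =
      some (shiftKeyLoopB cs false []) ∧ shiftKeyLoopB cs false [] ≠ [] := by
  induction cs with
  | nil => simp at h
  | cons c rest ih =>
    by_cases hd : PySem.Chars.isdigit c = true
    · have hs := sk_digit_not_space c hd
      constructor
      · simp only [List.filter_cons, hd, Bool.true_or, if_true]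
        simp only [PySem.Chars.split₀.go]
        rw [if_neg (by simp [hs])]
        rw [sk_first_tok _ [c] (by simp)]
        simp [shiftKeyLoopB, hd, sk_loop_true]
      · simp [shiftKeyLoopB, hd, sk_loop_true]
    · have h' : rest.any PySem.Chars.isdigit = true := by
        simp only [List.any_cons, hd, Bool.false_or] at h; exact h
      by_cases hs : PySem.Chars.isspace c = true
      · have := ih h'
        constructor
        · simp only [List.filter_cons, hd, hs, Bool.false_or, if_true]
          simp only [PySem.Chars.split₀.go, hs, if_true, List.isEmpty_nil]
          simpa [shiftKeyLoopB, hd, hs] using this.1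
        · simpa [shiftKeyLoopB, hd, hs] using this.2
      · have := ih h'
        constructor
        · simp only [List.filter_cons, hd, hs, Bool.false_or]
          simpa [shiftKeyLoopB, hd, hs] using this.1
        · simpa [shiftKeyLoopB, hd, hs] using this.2

theorem sk_flatMap_eq_filter (cs : List Char) :
    cs.flatMap (fun c => if PySem.Chars.isdigit c || PySem.Chars.isspace c then [c] else []) =
      cs.filter (fun c => PySem.Chars.isdigit c || PySem.Chars.isspace c) := by
  induction cs with
  | nil => rfl
  | cons c rest ih =>
    simp only [List.flatMap_cons, List.filter_cons, ih]
    split <;> simp_all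

-- ===== VERDICT (by name: the statement is the Claim_ definition above) =====
theorem shift_key_spec : Claim_equal_shift_key := by
  intro value _ hpre
  unfold Spec_shift_key shift_key shift_key_alt shiftKeyFinishB
  obtain ⟨hhead, hne⟩ := sk_main value.toList hpre
  rw [sk_flatMap_eq_filter]
  unfold PySem.Chars.split₀
  rcases hl : PySem.Chars.split₀.go
      (value.toList.filter (fun c => PySem.Chars.isdigit c || PySem.Chars.isspace c)) [] [] with
    _ | ⟨t, rest⟩
  · rw [hl] at hhead; simp at hhead
  · rw [hl] at hhead
    simp only [List.head?_cons, Option.some.injEq] at hhead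
    rw [hhead]
    simp [List.isEmpty_iff, hne]
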